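-- pv_equiv track=rewrite | github.com/vjsingh1984/victor | victor/coding/codebase/unified_extractor.py | _parse_hover_contents
-- ===== SOURCE A (Python) =====
-- from typing import TYPE_CHECKING, Any, Optional
--
-- def _parse_hover_contents(contents: str) -> dict[str, Optional[str]]:
--     """Parse signature and type info from LSP hover contents.
--
--     LSP hover format varies by language server:
--     - Python (pyright): "def foo(x: int) -> str"
--     - TypeScript (tsserver): "(method) Class.foo(x: number): string"
--     - Go (gopls): "func (r *Receiver) Method(x int) string"
--     """
--     result: dict[str, Optional[str]] = {
--         "signature": None,
--         "return_type": None,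
--         "docstring": None,
--     }
--
--     lines = contents.strip().split("\n")
--     in_docstring = False
--     docstring_lines = []
--
--     for line in lines:
--         line = line.strip()
--
--         # Skip markdown code fences
--         if line.startswith("```"):
--             continue
--         if line.startswith("---"):
--             in_docstring = True
--             continue
--
--         if in_docstring:
--             docstring_lines.append(line)
--             continue
--
--         # Look for function signatures
--         if "(" in line and ")" in line and not result["signature"]:
--             result["signature"] = line
--             # Extract return type if present
--             if " -> " in line:
--                 result["return_type"] = line.split(" -> ")[-1].strip()
--             elif "): " in line:
--                 # TypeScript style: ): ReturnType
--                 result["return_type"] = line.split("): ")[-1].strip()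
--             continue
--
--         # Look for type annotations (variable types)
--         if ":" in line and not line.startswith("#") and not result["signature"]:
--             result["signature"] = line
--
--     if docstring_lines:
--         result["docstring"] = "\n".join(docstring_lines)
--
--     return result
-- ===== SOURCE B (Python) =====
-- def _parse_hover_contents(contents: str) -> dict:
--     lines = [ln.strip() for ln in contents.strip().split("\n")]
--     sep = next((i for i, ln in enumerate(lines) if ln.startswith("---")), len(lines))
--     header = [ln for ln in lines[:sep] if not ln.startswith("```")]
--     doc = [ln for ln in lines[sep + 1:]
--            if not (ln.startswith("```") or ln.startswith("---"))]
--     sig_line = next((ln for ln in header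
--                      if ("(" in ln and ")" in ln)
--                      or (":" in ln and not ln.startswith("#"))), None)
--     return_type = None
--     if sig_line is not None and "(" in sig_line and ")" in sig_line:
--         if " -> " in sig_line:
--             return_type = sig_line.split(" -> ")[-1].strip()
--         elif "): " in sig_line:
--             return_type = sig_line.split("): ")[-1].strip()
--     return {
--         "signature": sig_line,
--         "return_type": return_type,
--         "docstring": "\n".join(doc) if doc else None,
--     }
-- ===== Notes on version B (the rewrite author's own statement) =====
-- stated objective: simpler
-- what changed: Replaces A's single stateful loop (in_docstring flag, set-once signature, accumulator list) with a split-then-select decomposition: find the index of the first separator line, filter the header and docstring halves declaratively, and pick the signature line with one find-first over the header.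
import Mathlib
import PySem

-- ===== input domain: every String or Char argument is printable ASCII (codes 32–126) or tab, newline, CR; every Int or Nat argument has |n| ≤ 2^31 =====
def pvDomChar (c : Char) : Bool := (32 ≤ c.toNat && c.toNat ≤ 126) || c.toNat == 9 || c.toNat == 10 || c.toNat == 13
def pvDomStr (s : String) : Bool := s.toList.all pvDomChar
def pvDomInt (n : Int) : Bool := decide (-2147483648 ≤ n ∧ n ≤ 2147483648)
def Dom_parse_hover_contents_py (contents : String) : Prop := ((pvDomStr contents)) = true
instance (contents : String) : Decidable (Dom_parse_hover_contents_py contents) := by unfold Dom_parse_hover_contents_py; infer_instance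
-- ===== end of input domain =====

-- B replaces A's single stateful loop by a split-at-separator-then-filter-and-find decomposition (objective: simpler).


-- ===== PORT A =====
-- Loop state = (result["signature"], result["return_type"], in_docstring, docstring_lines).
-- `not result["signature"]`: a stored signature is a line containing '(' or ':', hence never the
-- empty string, so Python's truthiness test is exactly "is none" here.
-- `line.split(sep)[-1]`: split? with a non-empty sep returns a non-empty list; [-1] is its last element.
def pvA_step (st : Option String × Option String × Bool × List String) (line0 : String) :
    Option String × Option String × Bool × List String :=
  let line := PySem.Str.strip line0
  let (sig, rt, inDoc, doc) := st
  if PySem.Str.startswith line "```" then (sig, rt, inDoc, doc)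
  else if PySem.Str.startswith line "---" then (sig, rt, true, doc)
  else if inDoc then (sig, rt, inDoc, doc ++ [line])
  else if PySem.Str.isIn "(" line && PySem.Str.isIn ")" line && sig == none then
    if PySem.Str.isIn " -> " line then
      (some line, some (PySem.Str.strip (((PySem.Str.split? line " -> ").getD []).getLastD "")), inDoc, doc)
    else if PySem.Str.isIn "): " line then
      (some line, some (PySem.Str.strip (((PySem.Str.split? line "): ").getD []).getLastD "")), inDoc, doc)
    else (some line, rt, inDoc, doc)
  else if PySem.Str.isIn ":" line && !(PySem.Str.startswith line "#") && sig == none then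
    (some line, rt, inDoc, doc)
  else (sig, rt, inDoc, doc)

-- dict with keys "signature","return_type","docstring" in insertion order (assignments overwrite in place)
def parse_hover_contents_py (contents : String) : List (String × Option String) :=
  let lines := (PySem.Str.split? (PySem.Str.strip contents) "\n").getD []
  let st := lines.foldl pvA_step (none, none, false, [])
  let (sig, rt, _, doc) := st
  [("signature", sig), ("return_type", rt),
   ("docstring", if doc.isEmpty then none else some (PySem.Str.join "\n" doc))]

-- ===== PORT B =====
def pvB_ret (l : String) : Option String :=
  if PySem.Str.isIn " -> " l then
    some (PySem.Str.strip (((PySem.Str.split? l " -> ").getD []).getLastD ""))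
  else if PySem.Str.isIn "): " l then
    some (PySem.Str.strip (((PySem.Str.split? l "): ").getD []).getLastD ""))
  else none

-- next((i for i, ln in enumerate(lines) if …), len(lines)) = List.findIdx (length when absent)
def parse_hover_contents_py_alt (contents : String) : List (String × Option String) :=
  let lines := ((PySem.Str.split? (PySem.Str.strip contents) "\n").getD []).map PySem.Str.strip
  let sep := lines.findIdx (fun ln => PySem.Str.startswith ln "---")
  let header := (lines.take sep).filter (fun ln => !PySem.Str.startswith ln "```")
  let doc := (lines.drop (sep + 1)).filter
      (fun ln => !(PySem.Str.startswith ln "```" || PySem.Str.startswith ln "---"))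
  let sigLine := header.find? (fun ln =>
      (PySem.Str.isIn "(" ln && PySem.Str.isIn ")" ln) ||
      (PySem.Str.isIn ":" ln && !PySem.Str.startswith ln "#"))
  let rt := match sigLine with
    | some l => if PySem.Str.isIn "(" l && PySem.Str.isIn ")" l then pvB_ret l else none
    | none => none
  [("signature", sigLine), ("return_type", rt),
   ("docstring", if doc.isEmpty then none else some (PySem.Str.join "\n" doc))]

-- ===== PRECONDITION & SPEC =====
def Spec_parse_hover_contents_py (contents : String) (out : List (String × Option String)) : Prop := out = parse_hover_contents_py_alt contents
instance (contents : String) (out : List (String × Option String)) : Decidable (Spec_parse_hover_contents_py contents out) := by unfold Spec_parse_hover_contents_py; infer_instance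

-- ===== CLAIM (what is proved, stated in full; the proofs are below) =====
def Claim_equal_parse_hover_contents_py : Prop := ∀ (contents : String), Dom_parse_hover_contents_py contents → Spec_parse_hover_contents_py contents (parse_hover_contents_py contents)

-- ===== LEMMAS AND PROOFS =====

-- named pieces of the step's conditions and values (definitionally equal to the code in the ports)
def pvFence (l : String) : Bool := PySem.Str.startswith l "```"
def pvSep (l : String) : Bool := PySem.Str.startswith l "---"
def pvParen (l : String) : Bool := PySem.Str.isIn "(" l && PySem.Str.isIn ")" l
def pvColon (l : String) : Bool := PySem.Str.isIn ":" l && !PySem.Str.startswith l "#"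
def pvMatch (l : String) : Bool := pvParen l || pvColon l
def pvDocKeep (l : String) : Bool := !(pvFence l || pvSep l)
def pvArrow (l : String) : Bool := PySem.Str.isIn " -> " l
def pvCparen (l : String) : Bool := PySem.Str.isIn "): " l
def pvTailArrow (l : String) : String := PySem.Str.strip (((PySem.Str.split? l " -> ").getD []).getLastD "")
def pvTailCparen (l : String) : String := PySem.Str.strip (((PySem.Str.split? l "): ").getD []).getLastD "")
def pvRetUpd (l : String) (rt : Option String) : Option String :=
  if pvArrow l then some (pvTailArrow l)
  else if pvCparen l then some (pvTailCparen l)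
  else rt

-- pvA_step, on an already-stripped line, re-expressed with the named predicates (definitional)
def pvStep (st : Option String × Option String × Bool × List String) (line : String) :
    Option String × Option String × Bool × List String :=
  let (sig, rt, inDoc, doc) := st
  if pvFence line then (sig, rt, inDoc, doc)
  else if pvSep line then (sig, rt, true, doc)
  else if inDoc then (sig, rt, inDoc, doc ++ [line])
  else if pvParen line && sig == none then
    if pvArrow line then (some line, some (pvTailArrow line), inDoc, doc)
    else if pvCparen line then (some line, some (pvTailCparen line), inDoc, doc)
    else (some line, rt, inDoc, doc)
  else if pvColon line && sig == none then
    (some line, rt, inDoc, doc)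
  else (sig, rt, inDoc, doc)

lemma pvA_step_eq (st : Option String × Option String × Bool × List String) (l : String) :
    pvA_step st l = pvStep st (PySem.Str.strip l) := rfl

lemma pvSep_fence (l : String) (h : pvSep l = true) : pvFence l = false := by
  simp [pvSep] at h
  simp only [pvFence, PySem.Str.startswith_eq]
  rcases (PySem.Chars.startswith_iff _ _).mp h with ⟨t, ht⟩
  rw [← ht]
  simp [PySem.Chars.startswith, List.isPrefixOf]

-- docstring phase: every remaining non-fence non-separator line is appended
lemma pvStep_doc (ls : List String) (sig rt : Option String) (doc : List String) :
    ls.foldl pvStep (sig, rt, true, doc) = (sig, rt, true, doc ++ ls.filter pvDocKeep) := by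
  induction ls generalizing doc with
  | nil => simp
  | cons l ls ih =>
      by_cases h1 : pvFence l = true
      · have hk : pvDocKeep l = false := by simp [pvDocKeep, h1]
        have hstep : pvStep (sig, rt, true, doc) l = (sig, rt, true, doc) := by
          simp [pvStep, h1]
        simp [List.foldl_cons, hstep, hk, ih]
      · by_cases h2 : pvSep l = true
        · have hk : pvDocKeep l = false := by simp [pvDocKeep, h2]
          have hstep : pvStep (sig, rt, true, doc) l = (sig, rt, true, doc) := by
            simp [pvStep, h1, h2]
          simp [List.foldl_cons, hstep, hk, ih]
        · have hk : pvDocKeep l = true := by simp [pvDocKeep, h1, h2]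
          have hstep : pvStep (sig, rt, true, doc) l = (sig, rt, true, doc ++ [l]) := by
            simp [pvStep, h1, h2]
          simp [List.foldl_cons, hstep, hk, ih]

-- header phase, signature already set: the state is inert until the separator
lemma pvStep_sat (ls : List String) (s : String) (rt : Option String) (doc : List String) :
    ls.foldl pvStep (some s, rt, false, doc) =
      (some s, rt, ls.any pvSep, doc ++ (ls.drop (ls.findIdx pvSep + 1)).filter pvDocKeep) := by
  induction ls generalizing doc with
  | nil => simp
  | cons l ls ih =>
      by_cases h2 : pvSep l = true
      · have h1 : pvFence l = false := pvSep_fence l h2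
        have hstep : pvStep (some s, rt, false, doc) l = (some s, rt, true, doc) := by
          simp [pvStep, h1, h2]
        simp [List.foldl_cons, hstep, pvStep_doc, List.findIdx_cons, h2]
      · have hstep : pvStep (some s, rt, false, doc) l = (some s, rt, false, doc) := by
          by_cases h1 : pvFence l = true
          · simp [pvStep, h1]
          · simp [pvStep, h1, h2]
        simp [List.foldl_cons, hstep, ih, List.findIdx_cons, h2]

def pvHeader (ls : List String) : List String :=
  (ls.take (ls.findIdx pvSep)).filter (fun l => !pvFence l)

-- header phase with no signature yet: the first matching non-fence line before the separator wins
lemma pvStep_main (ls : List String) (rt : Option String) (doc : List String) :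
    ls.foldl pvStep (none, rt, false, doc) =
      ((pvHeader ls).find? pvMatch,
       (match (pvHeader ls).find? pvMatch with
        | some l => if pvParen l then pvRetUpd l rt else rt
        | none => rt),
       ls.any pvSep,
       doc ++ (ls.drop (ls.findIdx pvSep + 1)).filter pvDocKeep) := by
  induction ls generalizing doc with
  | nil => simp [pvHeader]
  | cons l ls ih =>
      by_cases h2 : pvSep l = true
      · have h1 : pvFence l = false := pvSep_fence l h2
        have hstep : pvStep (none, rt, false, doc) l = (none, rt, true, doc) := by
          simp [pvStep, h1, h2]
        have hhd : pvHeader (l :: ls) = [] := by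
          simp [pvHeader, List.findIdx_cons, h2]
        simp [List.foldl_cons, hstep, pvStep_doc, hhd, List.findIdx_cons, h2]
      · have hsep : (l :: ls).findIdx pvSep = ls.findIdx pvSep + 1 := by
          simp [List.findIdx_cons, h2]
        by_cases h1 : pvFence l = true
        · have hstep : pvStep (none, rt, false, doc) l = (none, rt, false, doc) := by
            simp [pvStep, h1]
          have hhd : pvHeader (l :: ls) = pvHeader ls := by
            simp [pvHeader, List.findIdx_cons, h2, List.take_succ_cons, h1]
          simp [List.foldl_cons, hstep, ih, hhd, hsep, h2]
        · have hhd : pvHeader (l :: ls) = l :: pvHeader ls := by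
            simp [pvHeader, List.findIdx_cons, h2, List.take_succ_cons, h1]
          by_cases hp : pvParen l = true
          · have hstep : pvStep (none, rt, false, doc) l = (some l, pvRetUpd l rt, false, doc) := by
              by_cases ha : pvArrow l = true
              · simp [pvStep, pvRetUpd, h1, h2, hp, ha]
              · by_cases hb : pvCparen l = true
                · simp [pvStep, pvRetUpd, h1, h2, hp, ha, hb]
                · simp [pvStep, pvRetUpd, h1, h2, hp, ha, hb]
            have hfind : (pvHeader (l :: ls)).find? pvMatch = some l := by
              simp [hhd, List.find?_cons_of_pos, pvMatch, hp]
            simp [List.foldl_cons, hstep, pvStep_sat, hfind, hsep, h2, hp]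
          · by_cases hc : pvColon l = true
            · have hstep : pvStep (none, rt, false, doc) l = (some l, rt, false, doc) := by
                simp [pvStep, h1, h2, hp, hc]
              have hfind : (pvHeader (l :: ls)).find? pvMatch = some l := by
                simp [hhd, List.find?_cons_of_pos, pvMatch, hp, hc]
              simp [List.foldl_cons, hstep, pvStep_sat, hfind, hsep, h2, hp]
            · have hstep : pvStep (none, rt, false, doc) l = (none, rt, false, doc) := by
                simp [pvStep, h1, h2, hp, hc]
              have hfind : (pvHeader (l :: ls)).find? pvMatch = (pvHeader ls).find? pvMatch := by
                have hm : pvMatch l = false := by simp [pvMatch, hp, hc]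
                simp [hhd, List.find?_cons_of_neg, hm]
              simp [List.foldl_cons, hstep, ih, hfind, hsep, h2]

def pvCanon (ls : List String) : List (String × Option String) :=
  let sig := (pvHeader ls).find? pvMatch
  let rt := match sig with
    | some l => if pvParen l then pvRetUpd l none else none
    | none => none
  let doc := (ls.drop (ls.findIdx pvSep + 1)).filter pvDocKeep
  [("signature", sig), ("return_type", rt),
   ("docstring", if doc.isEmpty then none else some (PySem.Str.join "\n" doc))]

lemma pvFoldl_strip (ls : List String) (st : Option String × Option String × Bool × List String) :
    ls.foldl pvA_step st = (ls.map PySem.Str.strip).foldl pvStep st := by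
  rw [List.foldl_map]
  simp only [← pvA_step_eq]

lemma pvEtaSep : (fun ln : String => PySem.Str.startswith ln "---") = pvSep := rfl
lemma pvEtaFence : (fun ln : String => !PySem.Str.startswith ln "```") = (fun l => !pvFence l) := rfl
lemma pvEtaKeep :
    (fun ln : String => !(PySem.Str.startswith ln "```" || PySem.Str.startswith ln "---")) = pvDocKeep := rfl
lemma pvEtaMatch :
    (fun ln : String => (PySem.Str.isIn "(" ln && PySem.Str.isIn ")" ln) ||
      (PySem.Str.isIn ":" ln && !PySem.Str.startswith ln "#")) = pvMatch := rfl

-- ===== VERDICT (by name: the statement is the Claim_ definition above) =====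
lemma pvCanon_of_fold (ls0 : List String) :
    (match ls0.foldl pvA_step (none, none, false, ([] : List String)) with
     | (sig, rt, _, doc) =>
       [("signature", sig), ("return_type", rt),
        ("docstring", if doc.isEmpty then none else some (PySem.Str.join "\n" doc))])
    = pvCanon (ls0.map PySem.Str.strip) := by
  rw [pvFoldl_strip, pvStep_main]
  simp only [pvCanon, List.nil_append]

theorem parse_hover_contents_py_spec : Claim_equal_parse_hover_contents_py := by
  intro contents _
  unfold Spec_parse_hover_contents_py
  have hB : parse_hover_contents_py_alt contents =
      pvCanon (((PySem.Str.split? (PySem.Str.strip contents) "\n").getD []).map PySem.Str.strip) := by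
    simp only [parse_hover_contents_py_alt, pvCanon, pvHeader, pvRetUpd, pvArrow, pvCparen,
      pvTailArrow, pvTailCparen, pvB_ret, pvParen, pvEtaSep, pvEtaFence, pvEtaKeep, pvEtaMatch]
  have hA : parse_hover_contents_py contents =
      pvCanon (((PySem.Str.split? (PySem.Str.strip contents) "\n").getD []).map PySem.Str.strip) := by
    simp only [parse_hover_contents_py]
    exact pvCanon_of_fold _
  rw [hA, hB]
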